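-- pv_equiv track=rewrite | github.com/Istok-Mir/Mir | show_references.py | squash_nearby_lines
-- ===== SOURCE A (Python) =====
-- def squash_nearby_lines(input_data: dict[str, list[tuple[int, str]]]) -> dict[str, list[tuple[int, str]]]:
--     squashed_data: dict[str, list[tuple[int, str]]] = {}
--
--     for uri, references in input_data.items():
--         if not references:
--             squashed_data[uri] = []
--             continue
--         sorted_references: list[tuple[int, str]] = sorted(references, key=lambda x: x[0])
--         current_squashed_block: list[tuple[int, str]] = []
--         result_for_uri: list[tuple[int, str]] = []
--         for i, (row, line_content) in enumerate(sorted_references):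
--             if not current_squashed_block:
--                 # If the current block is empty, start a new one with the current reference.
--                 current_squashed_block.append((row, line_content))
--             else:
--                 # Get the row number of the last line added to the current squashed block.
--                 last_row_in_block: int = current_squashed_block[-1][0]
--                 if row == last_row_in_block + 1:
--                     # If the current line's row is exactly one greater than the last line's row,
--                     # it's consecutive, so add it to the current block.
--                     current_squashed_block.append((row, line_content))
--                 else:
--                     # If the current line is not consecutive, it means the previous block is complete.
--                     # Extract the first reference's row and column for the combined entry.
--                     first_row: int = current_squashed_block[0][0]
--
--                     # Join all line contents in the current block with a newline character.
--                     combined_content: str = "\n".join([item[1] for item in current_squashed_block])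
--
--                     # Add the combined entry to the result list for this URI.
--                     result_for_uri.append((first_row, combined_content))
--
--                     # Start a new squashed block with the current non-consecutive line.
--                     current_squashed_block = [(row, line_content)]
--
--         # After the loop finishes, there might be a pending `current_squashed_block`
--         # that needs to be added to the results.
--         if current_squashed_block:
--             first_row = current_squashed_block[0][0]
--             combined_content = "\n".join([item[1] for item in current_squashed_block])
--             result_for_uri.append((first_row, combined_content))
--
--         # Assign the processed list of squashed references to the URI in the final dictionary.
--         squashed_data[uri] = result_for_uri
--
--     return squashed_data
-- ===== SOURCE B (Python) =====
-- def squash_nearby_lines(input_data: dict[str, list[tuple[int, str]]]) -> dict[str, list[tuple[int, str]]]: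
--     def peel(refs):
--         # refs nonempty: split off the maximal run of consecutive rows at the front
--         head = refs[0]
--         if len(refs) > 1 and refs[1][0] == head[0] + 1:
--             run, rest = peel(refs[1:])
--             return [head] + run, rest
--         return [head], refs[1:]
--
--     def blocks(refs):
--         if not refs:
--             return []
--         run, rest = peel(refs)
--         return [(run[0][0], "\n".join(c for _, c in run))] + blocks(rest)
--
--     return {uri: blocks(sorted(refs, key=lambda x: x[0])) for uri, refs in input_data.items()}
-- ===== Notes on version B (the rewrite author's own statement) =====
-- stated objective: simpler
-- what changed: Replaces A's stateful current-block accumulator loop with final flush by a recursive peel of the maximal consecutive-row run at the front of the sorted list, emitting each block immediately, and a dict comprehension instead of the explicit outer loop.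
import Mathlib
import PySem

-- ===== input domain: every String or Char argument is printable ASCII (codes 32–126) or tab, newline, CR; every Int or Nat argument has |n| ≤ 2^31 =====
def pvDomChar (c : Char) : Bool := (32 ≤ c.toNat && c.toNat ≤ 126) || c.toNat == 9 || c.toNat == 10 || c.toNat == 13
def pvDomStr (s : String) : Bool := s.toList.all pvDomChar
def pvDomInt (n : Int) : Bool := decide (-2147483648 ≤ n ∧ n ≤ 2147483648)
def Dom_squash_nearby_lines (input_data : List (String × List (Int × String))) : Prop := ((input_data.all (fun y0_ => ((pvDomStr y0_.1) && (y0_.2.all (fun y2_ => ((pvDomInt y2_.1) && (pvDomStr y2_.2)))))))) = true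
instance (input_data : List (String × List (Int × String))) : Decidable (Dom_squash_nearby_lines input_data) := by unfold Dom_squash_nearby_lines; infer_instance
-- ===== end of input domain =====

-- B replaces A's running-block accumulator loop by a recursive peel of the leading
-- consecutive run (objective: simpler decomposition, same cost).

-- ===== PORT A =====
-- one step of A's inner loop; state = (current_squashed_block, result_for_uri)
def pvStepA (st : List (Int × String) × List (Int × String)) (x : Int × String) :
    List (Int × String) × List (Int × String) :=
  let block := st.1
  let res := st.2
  if block.isEmpty then (block ++ [x], res)
  else
    let last_row := (block.getLastD (0, "")).1  -- block[-1][0]; default unreachable (block nonempty)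
    if x.1 = last_row + 1 then (block ++ [x], res)
    else
      let first_row := (block.headD (0, "")).1  -- block[0][0]; default unreachable
      let combined := PySem.Str.join "\n" (block.map (·.2))
      ([x], res ++ [(first_row, combined)])

-- A's body for one URI's reference list
def pvInnerA (references : List (Int × String)) : List (Int × String) :=
  if references.isEmpty then []
  else
    let sorted_references := PySem.List.sorted references (fun x => x.1) false
    let st := sorted_references.foldl pvStepA ([], [])
    if st.1.isEmpty then st.2
    else st.2 ++ [((st.1.headD (0, "")).1, PySem.Str.join "\n" (st.1.map (·.2)))]

def squash_nearby_lines (input_data : List (String × List (Int × String))) : List (String × List (Int × String)) :=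
  (input_data.foldl (fun d p => d.insert p.1 (pvInnerA p.2)) (PySem.Dict.empty : PySem.Dict String (List (Int × String)))).items

-- ===== PORT B =====
-- peel(refs) on a nonempty list, written with refs = h :: t
def pvPeel : (Int × String) → List (Int × String) → List (Int × String) × List (Int × String)
  | h, [] => ([h], [])
  | h, h2 :: t =>
    if h2.1 = h.1 + 1 then
      let pr := pvPeel h2 t
      (h :: pr.1, pr.2)
    else ([h], h2 :: t)

theorem pvPeel_rest_length (h : Int × String) (t : List (Int × String)) :
    (pvPeel h t).2.length ≤ t.length := by
  induction t generalizing h with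
  | nil => simp [pvPeel]
  | cons h2 t ih =>
    simp only [pvPeel]
    split
    · exact Nat.le_succ_of_le (ih h2)
    · simp

def pvBlocks : List (Int × String) → List (Int × String)
  | [] => []
  | h :: t =>
    let pr := pvPeel h t
    ((pr.1.headD (0, "")).1, PySem.Str.join "\n" (pr.1.map (·.2))) :: pvBlocks pr.2
termination_by refs => refs.length
decreasing_by
  have := pvPeel_rest_length h t
  simp only [List.length_cons]
  omega

def squash_nearby_lines_alt (input_data : List (String × List (Int × String))) : List (String × List (Int × String)) :=
  (input_data.foldl
    (fun d p => d.insert p.1 (pvBlocks (PySem.List.sorted p.2 (fun x => x.1) false)))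
    (PySem.Dict.empty : PySem.Dict String (List (Int × String)))).items

-- ===== PRECONDITION & SPEC =====
def Spec_squash_nearby_lines (input_data : List (String × List (Int × String))) (out : List (String × List (Int × String))) : Prop := out = squash_nearby_lines_alt input_data
instance (input_data : List (String × List (Int × String))) (out : List (String × List (Int × String))) : Decidable (Spec_squash_nearby_lines input_data out) := by unfold Spec_squash_nearby_lines; infer_instance

-- ===== CLAIM (what is proved, stated in full; the proofs are below) =====
def Claim_equal_squash_nearby_lines : Prop := ∀ (input_data : List (String × List (Int × String))), Dom_squash_nearby_lines input_data → Spec_squash_nearby_lines input_data (squash_nearby_lines input_data)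

-- ===== LEMMAS AND PROOFS =====

-- proof helper: peel continued from a block whose last row is r
def pvContPeel (r : Int) : List (Int × String) → List (Int × String) × List (Int × String)
  | [] => ([], [])
  | y :: t =>
    if y.1 = r + 1 then
      let pr := pvContPeel y.1 t
      (y :: pr.1, pr.2)
    else ([], y :: t)

theorem pvPeel_eq_contPeel (h : Int × String) (t : List (Int × String)) :
    pvPeel h t = (h :: (pvContPeel h.1 t).1, (pvContPeel h.1 t).2) := by
  cases t with
  | nil => simp [pvPeel, pvContPeel]
  | cons h2 t =>
    simp only [pvPeel, pvContPeel]
    split <;> simp [pvPeel_eq_contPeel h2 t]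

-- A's flush of the final pending block
def pvFin (st : List (Int × String) × List (Int × String)) : List (Int × String) :=
  if st.1.isEmpty then st.2
  else st.2 ++ [((st.1.headD (0, "")).1, PySem.Str.join "\n" (st.1.map (·.2)))]

theorem pvBlocks_nil : pvBlocks [] = [] := by simp [pvBlocks]

theorem pvBlocks_cons (h : Int × String) (t : List (Int × String)) :
    pvBlocks (h :: t) =
      (((pvPeel h t).1.headD (0, "")).1, PySem.Str.join "\n" ((pvPeel h t).1.map (·.2)))
        :: pvBlocks (pvPeel h t).2 := by
  rw [pvBlocks]

-- invariant of A's inner loop: with a nonempty open block, the finished result is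
-- res, then the block extended by the consecutive prefix of ys, then B's blocks of the rest
theorem pvLoop_eq (ys : List (Int × String)) :
    ∀ (block res : List (Int × String)), block ≠ [] →
    pvFin (ys.foldl pvStepA (block, res)) =
      res ++ ((block.headD (0, "")).1,
              PySem.Str.join "\n" ((block ++ (pvContPeel (block.getLastD (0, "")).1 ys).1).map (·.2)))
          :: pvBlocks (pvContPeel (block.getLastD (0, "")).1 ys).2 := by
  induction ys with
  | nil =>
    intro block res hb
    simp [pvFin, pvContPeel, pvBlocks_nil, List.isEmpty_iff, hb]
  | cons y t ih =>
    intro block res hb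
    have hbe : block.isEmpty = false := by simp [hb]
    simp only [List.foldl_cons]
    by_cases hc : y.1 = (block.getLastD (0, "")).1 + 1
    · have hstep : pvStepA (block, res) y = (block ++ [y], res) := by
        simp only [pvStepA, hbe, Bool.false_eq_true, if_false]
        rw [if_pos (by simpa [List.getLastD_eq_getLast?] using hc)]
      rw [hstep, ih (block ++ [y]) res (by simp)]
      have hlast : ((block ++ [y]).getLastD (0, "")) = y := by simp
      have hhead : ((block ++ [y]).headD (0, "")) = block.headD (0, "") := by
        cases block with
        | nil => exact absurd rfl hb
        | cons b bs => simp
      rw [hlast, hhead]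
      simp only [pvContPeel, if_pos hc]
      simp
    · have hstep : pvStepA (block, res) y =
          ([y], res ++ [((block.headD (0, "")).1, PySem.Str.join "\n" (block.map (·.2)))]) := by
        simp only [pvStepA, hbe, Bool.false_eq_true, if_false]
        rw [if_neg (by simpa [List.getLastD_eq_getLast?] using hc)]
      rw [hstep, ih [y] _ (by simp)]
      have hB : pvBlocks (y :: t) =
          (y.1, PySem.Str.join "\n" ((y :: (pvContPeel y.1 t).1).map (·.2)))
            :: pvBlocks (pvContPeel y.1 t).2 := by
        rw [pvBlocks_cons]
        simp [pvPeel_eq_contPeel]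
      simp only [pvContPeel, if_neg hc]
      simp [hB]

theorem pvInner_eq (refs : List (Int × String)) :
    pvInnerA refs = pvBlocks (PySem.List.sorted refs (fun x => x.1) false) := by
  by_cases h : refs = []
  · subst h; simp [pvInnerA, pvBlocks_nil, PySem.List.sorted]
  · have hne : (PySem.List.sorted refs (fun x => x.1) false) ≠ [] := by
      simp [PySem.List.sorted_eq_nil_iff, h]
    obtain ⟨y, t, hyt⟩ := List.exists_cons_of_ne_nil hne
    have hre : refs.isEmpty = false := by simp [h]
    show (if refs.isEmpty then [] else _) = _
    rw [if_neg (by simp [hre])]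
    have h1 : pvStepA ([], []) y = ([y], []) := by simp [pvStepA]
    calc pvFin ((PySem.List.sorted refs (fun x => x.1) false).foldl pvStepA ([], []))
        = pvFin ((y :: t).foldl pvStepA ([], [])) := by rw [hyt]
      _ = pvFin (t.foldl pvStepA ([y], [])) := by simp [List.foldl_cons, h1]
      _ = pvBlocks (y :: t) := by
            rw [pvLoop_eq t [y] [] (by simp), pvBlocks_cons]
            simp [pvPeel_eq_contPeel]
      _ = pvBlocks (PySem.List.sorted refs (fun x => x.1) false) := by rw [hyt]

-- ===== VERDICT (by name: the statement is the Claim_ definition above) =====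
theorem squash_nearby_lines_spec : Claim_equal_squash_nearby_lines := by
  intro input_data _
  unfold Spec_squash_nearby_lines squash_nearby_lines squash_nearby_lines_alt
  have : (fun (d : PySem.Dict String (List (Int × String))) (p : String × List (Int × String)) =>
            d.insert p.1 (pvInnerA p.2)) =
         (fun d p => d.insert p.1 (pvBlocks (PySem.List.sorted p.2 (fun x => x.1) false))) := by
    funext d p; rw [pvInner_eq]
  rw [this]
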